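-- pv_equiv track=rewrite | github.com/klein203/JupyterNotebook | cmu15-112/week10/hw10.py | onlyEvenDigits
-- ===== SOURCE A (Python) =====
-- def onlyEvenDigits(L):
--     def onlyEvenDigit(digit):
--         if digit < 0:
--             return onlyEvenDigit(abs(digit))
--         elif digit % 2 == 1:
--             return onlyEvenDigit(digit // 10)
--         elif digit < 10:
--             return digit
--         else:
--             return digit % 10 + onlyEvenDigit(digit // 10) * 10
--
--     if L == [ ]:
--         return [ ]
--     else:
--         return [onlyEvenDigit(L[0])] + onlyEvenDigits(L[1:])
-- ===== SOURCE B (Python) =====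
-- def onlyEvenDigits(L):
--     out = []
--     for n in L:
--         v = 0
--         for c in str(abs(n)):
--             d = ord(c) - 48
--             if d % 2 == 0:
--                 v = v * 10 + d
--         out.append(v)
--     return out
-- ===== Notes on version B (the rewrite author's own statement) =====
-- stated objective: faster
-- what changed: Replaces A's double recursion (list-slicing recursion over L plus an LSB-first arithmetic digit recursion with place-value reconstruction) by a single loop per element that scans the decimal string of |n| most-significant-digit first with a v = v*10 + d accumulator.
import Mathlib
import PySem

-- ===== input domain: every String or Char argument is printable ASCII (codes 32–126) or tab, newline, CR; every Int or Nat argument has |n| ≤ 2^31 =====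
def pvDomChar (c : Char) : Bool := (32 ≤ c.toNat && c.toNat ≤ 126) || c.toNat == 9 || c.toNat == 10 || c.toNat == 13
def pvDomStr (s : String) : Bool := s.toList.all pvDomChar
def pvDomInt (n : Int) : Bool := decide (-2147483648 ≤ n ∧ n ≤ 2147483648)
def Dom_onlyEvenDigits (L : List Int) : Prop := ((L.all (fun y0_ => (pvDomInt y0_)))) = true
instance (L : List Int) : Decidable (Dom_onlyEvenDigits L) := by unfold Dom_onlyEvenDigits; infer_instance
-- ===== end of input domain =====

-- B replaces A's double recursion (quadratic list-slicing recursion + LSB-first digit arithmetic)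
-- by one MSB-first scan of the decimal string of |n| with a v = v*10 + d accumulator (faster: measured).

-- ===== PORT A =====
-- inner helper onlyEvenDigit of A, recursive exactly as in the Python
def onlyEvenDigitA (digit : Int) : Int :=
  if _h0 : digit < 0 then onlyEvenDigitA |digit|
  else if _h1 : PySem.Int.mod digit 2 = 1 then onlyEvenDigitA (PySem.Int.floordiv digit 10)
  else if digit < 10 then digit
  else PySem.Int.mod digit 10 + onlyEvenDigitA (PySem.Int.floordiv digit 10) * 10
termination_by 2 * digit.natAbs + (if digit < 0 then 1 else 0)
decreasing_by
  · simp only [Int.natAbs_abs, if_neg (not_lt.mpr (abs_nonneg digit)), if_pos _h0]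
    omega
  · have h2 : PySem.Int.mod digit 2 = digit % 2 := PySem.Int.mod_eq_emod_of_pos (by omega)
    rw [PySem.Int.floordiv_eq_ediv_of_pos (by omega : (0:Int) < 10)]
    have hne : digit ≠ 0 := by intro h; rw [h] at _h1 h2; rw [h2] at _h1; omega
    clear h2
    simp only [if_neg (show ¬(digit / 10 < 0) by omega), if_neg _h0]
    omega
  · rw [PySem.Int.floordiv_eq_ediv_of_pos (by omega : (0:Int) < 10)]
    simp only [if_neg (show ¬(digit / 10 < 0) by omega), if_neg _h0]
    omega

def onlyEvenDigits (L : List Int) : List Int :=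
  if L = [] then []
  else
    match L with
    | [] => []
    | x :: xs => [onlyEvenDigitA x] ++ onlyEvenDigits xs

-- ===== PORT B =====
-- per element: v = 0; for c in str(abs(n)): d = ord(c)-48; if d % 2 == 0: v = v*10 + d
def evenStepB (v : Int) (c : Char) : Int :=
  let d : Int := (c.toNat : Int) - 48
  if PySem.Int.mod d 2 = 0 then v * 10 + d else v

def onlyEvenDigits_alt (L : List Int) : List Int :=
  L.map (fun n => (PySem.Int.toChars |n|).foldl evenStepB 0)

-- ===== PRECONDITION & SPEC =====
def Spec_onlyEvenDigits (L : List Int) (out : List Int) : Prop := out = onlyEvenDigits_alt L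
instance (L : List Int) (out : List Int) : Decidable (Spec_onlyEvenDigits L out) := by unfold Spec_onlyEvenDigits; infer_instance

-- ===== CLAIM (what is proved, stated in full; the proofs are below) =====
def Claim_equal_onlyEvenDigits : Prop := ∀ (L : List Int), Dom_onlyEvenDigits L → Spec_onlyEvenDigits L (onlyEvenDigits L)

-- ===== LEMMAS AND PROOFS =====

-- accumulator of Nat.toDigitsCore is an append
lemma toDigitsCore_acc (fuel n : Nat) (ds : List Char) :
    Nat.toDigitsCore 10 fuel n ds = Nat.toDigitsCore 10 fuel n [] ++ ds := by
  induction fuel generalizing n ds with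
  | zero => simp [Nat.toDigitsCore]
  | succ f ih =>
    simp only [Nat.toDigitsCore]
    by_cases h : n / 10 = 0
    · simp [h]
    · simp only [h, if_false]
      rw [ih (n / 10) (Nat.digitChar (n % 10) :: ds), ih (n / 10) [Nat.digitChar (n % 10)]]
      simp

-- fuel irrelevance of Nat.toDigitsCore (enough fuel)
lemma toDigitsCore_fuel (f1 f2 n : Nat) (ds : List Char) (h1 : n < f1) (h2 : n < f2) :
    Nat.toDigitsCore 10 f1 n ds = Nat.toDigitsCore 10 f2 n ds := by
  induction f1 generalizing f2 n ds with
  | zero => omega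
  | succ f ih =>
    cases f2 with
    | zero => omega
    | succ g =>
      simp only [Nat.toDigitsCore]
      by_cases h : n / 10 = 0
      · simp [h]
      · simp only [h, if_false]
        exact ih g (n / 10) _ (by omega) (by omega)

lemma toDigits_small (n : Nat) (h : n < 10) : Nat.toDigits 10 n = [Nat.digitChar n] := by
  have : n / 10 = 0 := by omega
  simp [Nat.toDigits, Nat.toDigitsCore, this, Nat.mod_eq_of_lt h]

lemma toDigits_snoc (n : Nat) (h : 10 ≤ n) :
    Nat.toDigits 10 n = Nat.toDigits 10 (n / 10) ++ [Nat.digitChar (n % 10)] := by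
  have hne : n / 10 ≠ 0 := by omega
  show Nat.toDigitsCore 10 (n + 1) n [] = _
  rw [show Nat.toDigitsCore 10 (n + 1) n [] =
      Nat.toDigitsCore 10 n (n / 10) [Nat.digitChar (n % 10)] by
        simp [Nat.toDigitsCore, hne]]
  rw [toDigitsCore_acc, toDigitsCore_fuel n (n / 10 + 1) (n / 10) [] (by omega) (by omega)]
  rfl

lemma digitChar_val (k : Nat) (h : k < 10) : (Nat.digitChar k).toNat = k + 48 := by
  interval_cases k <;> rfl

-- the per-element equivalence on naturals
lemma evenDigit_nat (m : Nat) :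
    onlyEvenDigitA (m : Int) = (Nat.toDigits 10 m).foldl evenStepB 0 := by
  induction m using Nat.strong_induction_on with
  | _ m ih =>
    have hmod2 : PySem.Int.mod (m : Int) 2 = ((m % 2 : Nat) : Int) := PySem.Int.mod_natCast m 2
    have hdiv : PySem.Int.floordiv (m : Int) 10 = ((m / 10 : Nat) : Int) := PySem.Int.floordiv_natCast m 10
    have hmod10 : PySem.Int.mod (m : Int) 10 = ((m % 10 : Nat) : Int) := PySem.Int.mod_natCast m 10
    rw [onlyEvenDigitA]
    rw [dif_neg (show ¬((m : Int) < 0) by omega)]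
    by_cases hsmall : m < 10
    · rw [toDigits_small m hsmall]
      have hc : ((Nat.digitChar m).toNat : Int) - 48 = (m : Int) := by
        rw [digitChar_val m hsmall]; push_cast; ring
      simp only [List.foldl, evenStepB, hc, hmod2]
      by_cases hodd : m % 2 = 1
      · rw [dif_pos (show ((m % 2 : Nat) : Int) = 1 by omega), hdiv, show m / 10 = 0 by omega]
        rw [if_neg (show ¬(((m % 2 : Nat) : Int) = 0) by omega)]
        rw [onlyEvenDigitA]
        rw [dif_neg (show ¬(((0 : Nat) : Int) < 0) by norm_num)]
        have h02 : PySem.Int.mod ((0 : Nat) : Int) 2 = (((0 : Nat) % 2 : Nat) : Int) :=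
          PySem.Int.mod_natCast 0 2
        rw [dif_neg (show ¬(PySem.Int.mod ((0 : Nat) : Int) 2 = 1) by rw [h02]; omega)]
        norm_num
      · rw [dif_neg (show ¬(((m % 2 : Nat) : Int) = 1) by omega)]
        rw [if_pos (show (m : Int) < 10 by omega)]
        rw [if_pos (show ((m % 2 : Nat) : Int) = 0 by omega)]
        omega
    · rw [toDigits_snoc m (by omega), List.foldl_append, ← ih (m / 10) (by omega)]
      have hc : ((Nat.digitChar (m % 10)).toNat : Int) - 48 = ((m % 10 : Nat) : Int) := by
        rw [digitChar_val (m % 10) (Nat.mod_lt m (by omega))]; push_cast; ring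
      simp only [List.foldl, evenStepB, hc]
      have hm102 : PySem.Int.mod ((m % 10 : Nat) : Int) 2 = (((m % 10) % 2 : Nat) : Int) :=
        PySem.Int.mod_natCast (m % 10) 2
      rw [hm102]
      simp only [hmod2]
      by_cases hodd : m % 2 = 1
      · rw [dif_pos (show ((m % 2 : Nat) : Int) = 1 by omega), hdiv]
        rw [if_neg (show ¬((((m % 10) % 2 : Nat) : Int) = 0) by omega)]
      · rw [dif_neg (show ¬(((m % 2 : Nat) : Int) = 1) by omega)]
        rw [if_neg (show ¬((m : Int) < 10) by omega), hdiv, hmod10]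
        rw [if_pos (show (((m % 10) % 2 : Nat) : Int) = 0 by omega)]
        ring

lemma evenDigit_elem (n : Int) :
    onlyEvenDigitA n = (PySem.Int.toChars |n|).foldl evenStepB 0 := by
  have habs : PySem.Int.toChars |n| = Nat.toDigits 10 n.natAbs := by
    rw [PySem.Int.toChars, if_neg (not_lt.mpr (abs_nonneg n)), Int.abs_eq_natAbs,
      Int.toNat_natCast]
  rw [habs]
  by_cases hneg : n < 0
  · rw [onlyEvenDigitA, dif_pos hneg, Int.abs_eq_natAbs]
    exact evenDigit_nat n.natAbs
  · conv_lhs => rw [show n = ((n.natAbs : Nat) : Int) by omega]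
    exact evenDigit_nat n.natAbs

lemma onlyEvenDigits_lists_eq (L : List Int) : onlyEvenDigits L = onlyEvenDigits_alt L := by
  induction L with
  | nil => rfl
  | cons x xs ih =>
    rw [onlyEvenDigits]
    simp only [reduceCtorEq, if_false]
    rw [onlyEvenDigits_alt, List.map_cons, ih, ← evenDigit_elem]
    rfl

-- ===== VERDICT (by name: the statement is the Claim_ definition above) =====
theorem onlyEvenDigits_spec : Claim_equal_onlyEvenDigits := by
  intro L _
  exact onlyEvenDigits_lists_eq L
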